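-- pv_equiv track=rewrite | github.com/HongyuS/Vegetable-Market | CSC1001/Assignment_2/q3.py | sumOfDoubleEvenPlace
-- ===== SOURCE A (Python) =====
-- def sumOfDoubleEvenPlace(number):
--     _sum = 0
--     for i in range(2, len(number)+1, 2):
--         evenPlace = int(number[len(number) - i])
--         if evenPlace < 5:
--             _sum += evenPlace * 2
--         else:
--             _sum += getDigit(evenPlace * 2)
--     return _sum
--
-- def getDigit(n):
--     n = str(n)
--     return int(n[0]) + int(n[1])
-- ===== SOURCE B (Python) =====
-- def sumOfDoubleEvenPlace(number):
--     # Stage 1: collect the even-place digits (second-from-last, fourth-from-last, ...).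
--     ds = []
--     i = len(number) - 2
--     while i >= 0:
--         ds.append(int(number[i]))
--         i -= 2
--     # Stage 2: aggregate identity.  Doubling a digit d and summing the decimal
--     # digits of the result gives 2*d when d < 5 and 2*d - 9 when d >= 5, so the
--     # whole Luhn sum is 2*(sum of digits) - 9*(how many digits are >= 5).
--     return 2 * sum(ds) - 9 * sum(1 for d in ds if d >= 5)
-- ===== Notes on version B (the rewrite author's own statement) =====
-- stated objective: alternative
-- what changed: Replaces A's single accumulator pass with a per-digit if/else Luhn transform (and the string-based getDigit helper) by a staged computation: first collect the even-place digits into a list, then return 2*sum(digits) - 9*count(digits >= 5), using the aggregate identity that digit-summing a doubled digit subtracts 9 exactly when the digit is >= 5.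
import Mathlib
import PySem

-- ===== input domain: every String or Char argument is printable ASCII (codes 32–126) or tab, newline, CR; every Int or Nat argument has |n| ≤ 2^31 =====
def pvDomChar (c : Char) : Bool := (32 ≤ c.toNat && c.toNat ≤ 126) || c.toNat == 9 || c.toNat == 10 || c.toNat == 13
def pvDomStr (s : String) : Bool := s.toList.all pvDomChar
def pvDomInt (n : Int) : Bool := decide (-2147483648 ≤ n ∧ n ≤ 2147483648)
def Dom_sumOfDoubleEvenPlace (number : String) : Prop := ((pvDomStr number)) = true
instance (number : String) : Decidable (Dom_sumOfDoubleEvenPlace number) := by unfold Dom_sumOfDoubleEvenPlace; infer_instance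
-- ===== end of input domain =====

-- B replaces A's single accumulator pass with a per-digit if/else transform by a
-- staged computation: collect the even-place digits, then 2*sum - 9*count(>= 5)
-- (objective: alternative; same O(n) cost).

-- ===== PORT A =====
-- getDigit: n = str(n); return int(n[0]) + int(n[1]).  The `.getD 0` defaults are
-- only taken where Python would raise; A calls getDigit only with n in 10..18.
def getDigit (n : Int) : Int :=
  let s := PySem.Int.toChars n
  ((PySem.List.pyGet? s 0).bind (fun c => PySem.Int.ofChars? [c])).getD 0 +
  ((PySem.List.pyGet? s 1).bind (fun c => PySem.Int.ofChars? [c])).getD 0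

-- for i in range(2, len(number)+1, 2): evenPlace = int(number[len(number)-i]); ...
-- The Option accumulator is `none` exactly where Python's int() raises ValueError
-- (excluded by Pre_); the index len(number)-i is always in range.
def sumOfDoubleEvenPlace (number : String) : Int :=
  let n : Int := PySem.Str.len number
  ((PySem.List.pyRange 2 (n + 1) 2).foldl
      (fun (acc : Option Int) (i : Int) =>
        acc.bind (fun s =>
          ((PySem.Str.pyGet? number (n - i)).bind (fun c => PySem.Int.ofChars? [c])).map
            (fun d => if d < 5 then s + d * 2 else s + getDigit (d * 2))))
      (some 0)).getD 0

-- ===== PORT B =====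
-- Stage 1 of Source B: `while i >= 0: ds.append(int(number[i])); i -= 2`.
-- The Option value is `none` exactly where int() raises ValueError (excluded by Pre_).
def pvCollect (s : List Char) (i : Int) (acc : Option (List Int)) : Option (List Int) :=
  if 0 ≤ i then
    pvCollect s (i - 2)
      (acc.bind (fun ds =>
        ((PySem.List.pyGet? s i).bind (fun c => PySem.Int.ofChars? [c])).map
          (fun d => ds ++ [d])))
  else acc
termination_by (i + 2).toNat
decreasing_by omega

-- Stage 2 of Source B: 2 * sum(ds) - 9 * sum(1 for d in ds if d >= 5).
def sumOfDoubleEvenPlace_alt (number : String) : Int :=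
  match pvCollect number.toList (PySem.Str.len number - 2) (some []) with
  | none => 0
  | some ds => 2 * ds.sum - 9 * ((ds.countP (fun d => 5 ≤ d) : Nat) : Int)

-- ===== PRECONDITION & SPEC =====
-- The characters of the reversed string at odd positions 1, 3, 5, … (Python's
-- "even places" counted from the right).
def pvOddElems : List Char → List Char
  | _ :: c :: rest => c :: pvOddElems rest
  | _ => []

-- A raises ValueError exactly when some even-place character (from the right) is
-- not a decimal digit; Pre_ admits exactly the inputs on which A returns.
def Pre_sumOfDoubleEvenPlace (number : String) : Prop :=
  ((pvOddElems number.toList.reverse).all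
    (fun c => ['0', '1', '2', '3', '4', '5', '6', '7', '8', '9'].contains c)) = true
instance (number : String) : Decidable (Pre_sumOfDoubleEvenPlace number) := by
  unfold Pre_sumOfDoubleEvenPlace; infer_instance

def pvWitness_sumOfDoubleEvenPlace : String := "1234"

def Spec_sumOfDoubleEvenPlace (number : String) (out : Int) : Prop := out = sumOfDoubleEvenPlace_alt number
instance (number : String) (out : Int) : Decidable (Spec_sumOfDoubleEvenPlace number out) := by unfold Spec_sumOfDoubleEvenPlace; infer_instance

-- ===== CLAIM (what is proved, stated in full; the proofs are below) =====
def Claim_equal_sumOfDoubleEvenPlace : Prop := ∀ (number : String), Dom_sumOfDoubleEvenPlace number → Pre_sumOfDoubleEvenPlace number → Spec_sumOfDoubleEvenPlace number (sumOfDoubleEvenPlace number)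

-- ===== LEMMAS AND PROOFS =====

-- A's per-step function (after the in-range index access has been resolved).
def pvStepA (acc : Option Int) (c : Char) : Option Int :=
  acc.bind (fun s =>
    (PySem.Int.ofChars? [c]).map (fun d => if d < 5 then s + d * 2 else s + getDigit (d * 2)))

-- int() applied to each collected character, in order (the value Stage 1 builds).
def pvMapM : List Char → Option (List Int)
  | [] => some []
  | c :: cs => (PySem.Int.ofChars? [c]).bind (fun d => (pvMapM cs).map (fun ds => d :: ds))

theorem pvOddElems_nil : pvOddElems [] = [] := rfl
theorem pvOddElems_single (x : Char) : pvOddElems [x] = [] := rfl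
theorem pvOddElems_cons₂ (x c : Char) (rest : List Char) :
    pvOddElems (x :: c :: rest) = c :: pvOddElems rest := rfl

-- Folding a step function over the odd-indexed elements, phrased as an index
-- loop over List.range (length/2).
theorem pvRangeFold (step : Option Int → Char → Option Int) :
    (r : List Char) → (acc : Option Int) →
    (List.range (r.length / 2)).foldl (fun a k => step a (r.getD (2 * k + 1) ' ')) acc
      = (pvOddElems r).foldl step acc
  | [], acc => by simp [pvOddElems_nil]
  | [x], acc => by
    have h1 : ([x] : List Char).length / 2 = 0 := by simp
    rw [h1, pvOddElems_single]
    rfl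
  | x :: c :: rest, acc => by
    have hlen : (x :: c :: rest).length / 2 = rest.length / 2 + 1 := by
      simp [List.length_cons]; omega
    rw [hlen, List.range_succ_eq_map, List.foldl_cons, List.foldl_map]
    have hidx : ∀ k : Nat,
        (x :: c :: rest).getD (2 * (k + 1) + 1) ' ' = rest.getD (2 * k + 1) ' ' := by
      intro k
      have h2 : 2 * (k + 1) + 1 = (2 * k + 1) + 1 + 1 := by omega
      rw [h2, List.getD_cons_succ, List.getD_cons_succ]
    have hbody :
        (List.range (rest.length / 2)).foldl
            (fun a k => step a ((x :: c :: rest).getD (2 * (k + 1) + 1) ' '))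
            (step acc ((x :: c :: rest).getD 1 ' '))
          = (List.range (rest.length / 2)).foldl
              (fun a k => step a (rest.getD (2 * k + 1) ' ')) (step acc c) := by
      refine PySem.List.foldl_congr_mem _ _ _ _ ?_
      intro a k _
      rw [hidx k]
    simp only [Nat.succ_eq_add_one] at hbody ⊢
    rw [hbody, pvRangeFold step rest (step acc c), pvOddElems_cons₂, List.foldl_cons]

-- A's port, normalised to the fold of pvStepA over the odd elements of the
-- reversed character list.
theorem pvA_norm (number : String) :
    sumOfDoubleEvenPlace number
      = ((pvOddElems number.toList.reverse).foldl pvStepA (some 0)).getD 0 := by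
  unfold sumOfDoubleEvenPlace
  simp only [PySem.Str.len_eq]
  rw [PySem.List.pyRange_of_pos _ _ (by norm_num : (0 : Int) < 2), List.foldl_map]
  have hm : (if (2 : Int) < (number.toList.length : Int) + 1
      then (((number.toList.length : Int) + 1 - 2 + 2 - 1) / 2).toNat else 0)
      = number.toList.length / 2 := by
    split_ifs with h
    · have h2 : ((number.toList.length : Int) + 1 - 2 + 2 - 1) = (number.toList.length : Int) := by
        ring
      rw [h2]; omega
    · omega
  rw [hm]
  congr 1
  refine Eq.trans (PySem.List.foldl_congr_mem _ _
      (fun a k => pvStepA a (number.toList.reverse.getD (2 * k + 1) ' ')) _ ?_) ?_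
  · intro acc k hk
    have hklt : k < number.toList.length / 2 := List.mem_range.mp hk
    have hle : 2 * k + 2 ≤ number.toList.length := by omega
    have hidx : ((number.toList.length : Int) - (2 + 2 * (k : Int)))
        = ((number.toList.length - 2 - 2 * k : Nat) : Int) := by
      push_cast [Nat.sub_sub]
      omega
    have hbound : 2 * k + 1 < number.toList.reverse.length := by
      rw [List.length_reverse]; omega
    have hget : PySem.Str.pyGet? number ((number.toList.length : Int) - (2 + 2 * (k : Int)))
        = some (number.toList.reverse.getD (2 * k + 1) ' ') := by
      simp only [PySem.Str.pyGet?, PySem.Chars.pyGet?]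
      rw [hidx, PySem.List.pyGet?_natCast, List.getElem?_eq_getElem (by omega)]
      rw [List.getD_eq_getElem _ _ hbound, List.getElem_reverse]
      have hi2 : number.toList.length - 1 - (2 * k + 1) = number.toList.length - 2 - 2 * k := by
        omega
      simp only [hi2]
    simp only [hget]
    rfl
  · have h := pvRangeFold pvStepA number.toList.reverse (some 0)
    rw [List.length_reverse] at h
    exact h

-- Stage 1 never reads past t when started below t's length, so trailing
-- characters can be dropped.
theorem pvCollect_append (t e : List Char) (i : Int) (hlt : i < (t.length : Int))
    (acc : Option (List Int)) : pvCollect (t ++ e) i acc = pvCollect t i acc := by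
  by_cases h0 : 0 ≤ i
  · have hget : PySem.List.pyGet? (t ++ e) i = PySem.List.pyGet? t i := by
      have hi : i = ((i.toNat : Nat) : Int) := by omega
      rw [hi, PySem.List.pyGet?_natCast, PySem.List.pyGet?_natCast,
        List.getElem?_append_left (by omega)]
    have hL : pvCollect (t ++ e) i acc
        = pvCollect (t ++ e) (i - 2)
            (acc.bind (fun ds =>
              ((PySem.List.pyGet? t i).bind (fun c => PySem.Int.ofChars? [c])).map
                (fun d => ds ++ [d]))) := by
      conv_lhs => rw [pvCollect]
      rw [if_pos h0, hget]
    have hR : pvCollect t i acc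
        = pvCollect t (i - 2)
            (acc.bind (fun ds =>
              ((PySem.List.pyGet? t i).bind (fun c => PySem.Int.ofChars? [c])).map
                (fun d => ds ++ [d]))) := by
      conv_lhs => rw [pvCollect]
      rw [if_pos h0]
    rw [hL, hR]
    exact pvCollect_append t e (i - 2) (by omega) _
  · have hL : pvCollect (t ++ e) i acc = acc := by rw [pvCollect, if_neg h0]
    have hR : pvCollect t i acc = acc := by rw [pvCollect, if_neg h0]
    rw [hL, hR]
termination_by (i + 2).toNat
decreasing_by omega

-- Stage 1, characterised: starting at index length-2 it appends exactly
-- int() of the odd elements of the reversed list.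
theorem pvCollect_rev :
    (r : List Char) → (acc : Option (List Int)) →
      pvCollect r.reverse ((r.reverse.length : Int) - 2) acc
        = acc.bind (fun ds0 => (pvMapM (pvOddElems r)).map (fun t => ds0 ++ t))
  | [], acc => by
    rw [pvCollect, if_neg (by simp)]
    cases acc <;> simp [pvOddElems_nil, pvMapM]
  | [x], acc => by
    rw [pvCollect, if_neg (by simp)]
    cases acc <;> simp [pvOddElems_single, pvMapM]
  | x :: c :: rest, acc => by
    have hs : (x :: c :: rest).reverse = rest.reverse ++ [c, x] := by
      simp
    have hlen : ((rest.reverse ++ [c, x]).length : Int) - 2 = (rest.length : Int) := by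
      simp
    rw [hs, hlen, pvCollect, if_pos (by positivity)]
    have hget : PySem.List.pyGet? (rest.reverse ++ [c, x]) ((rest.length : Int)) = some c := by
      rw [PySem.List.pyGet?_natCast]
      rw [List.getElem?_append_right (by simp)]
      simp
    rw [hget]
    have happ := pvCollect_append rest.reverse [c, x] ((rest.length : Int) - 2)
      (by simp)
      (acc.bind fun ds => ((some c).bind fun c' => PySem.Int.ofChars? [c']).map fun d => ds ++ [d])
    rw [happ]
    have hlen2 : ((rest.length : Int) - 2) = ((rest.reverse.length : Int) - 2) := by simp
    rw [hlen2, pvCollect_rev rest _, pvOddElems_cons₂]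
    simp only [pvMapM, Option.bind_some]
    cases acc with
    | none => rfl
    | some ds =>
      cases hc : PySem.Int.ofChars? [c] with
      | none => simp
      | some d =>
        cases hM : pvMapM (pvOddElems rest) with
        | none => simp
        | some t => simp

-- Each collected character is a decimal digit under Pre_; its int() value is in 0..9.
set_option maxRecDepth 4096 in
theorem pvDigitVal (c : Char)
    (h : (['0', '1', '2', '3', '4', '5', '6', '7', '8', '9'].contains c) = true) :
    ∃ d : Int, PySem.Int.ofChars? [c] = some d ∧ 0 ≤ d ∧ d ≤ 9 := by
  have hmem : c ∈ ['0', '1', '2', '3', '4', '5', '6', '7', '8', '9'] :=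
    List.mem_of_elem_eq_true h
  fin_cases hmem <;> exact ⟨_, rfl, by decide, by decide⟩

-- The aggregate identity: double-and-digit-sum equals 2d, minus 9 when d ≥ 5.
theorem pvTransform (d : Int) (h0 : 0 ≤ d) (h9 : d ≤ 9) :
    (if d < 5 then d * 2 else getDigit (d * 2))
      = 2 * d - 9 * (if 5 ≤ d then 1 else 0) := by
  interval_cases d <;> decide

-- A's fold over digit characters computes the Stage-2 formula over their int() values.
theorem pvFoldA :
    (L : List Char) →
      (∀ c ∈ L, (['0', '1', '2', '3', '4', '5', '6', '7', '8', '9'].contains c) = true) →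
      ∀ (s : Int),
        L.foldl pvStepA (some s)
          = (pvMapM L).map
              (fun ds => s + (2 * ds.sum - 9 * ((ds.countP (fun d => 5 ≤ d) : Nat) : Int)))
  | [], _, s => by simp [pvMapM]
  | c :: L', h, s => by
    obtain ⟨d, hc, h0, h9⟩ := pvDigitVal c (h c (List.mem_cons_self))
    have hbody : (if d < 5 then s + d * 2 else s + getDigit (d * 2))
        = s + (2 * d - 9 * (if 5 ≤ d then 1 else 0)) := by
      rw [← pvTransform d h0 h9]
      split_ifs <;> rfl
    have hstep : pvStepA (some s) c = some (s + (2 * d - 9 * (if 5 ≤ d then 1 else 0))) := by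
      simp [pvStepA, hc, hbody]
    rw [List.foldl_cons, hstep,
      pvFoldA L' (fun c' hc' => h c' (List.mem_cons_of_mem _ hc')) _]
    simp only [pvMapM, hc, Option.bind_some]
    cases hM : pvMapM L' with
    | none => simp
    | some t =>
      simp only [Option.map_some, List.sum_cons, List.countP_cons]
      congr 1
      by_cases h5 : 5 ≤ d <;> simp [h5] <;> omega

-- B's port, normalised: Stage 1 is int() of the odd elements of the reversed list.
theorem pvB_norm (number : String) :
    sumOfDoubleEvenPlace_alt number
      = match pvMapM (pvOddElems number.toList.reverse) with
        | none => 0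
        | some ds => 2 * ds.sum - 9 * ((ds.countP (fun d => 5 ≤ d) : Nat) : Int) := by
  unfold sumOfDoubleEvenPlace_alt
  have h := pvCollect_rev number.toList.reverse (some [])
  rw [List.reverse_reverse] at h
  simp only [PySem.Str.len_eq]
  rw [h]
  cases pvMapM (pvOddElems number.toList.reverse) with
  | none => rfl
  | some ds => simp

-- ===== VERDICT (by name: the statement is the Claim_ definition above) =====
theorem sumOfDoubleEvenPlace_spec : Claim_equal_sumOfDoubleEvenPlace := by
  intro number _ hpre
  unfold Spec_sumOfDoubleEvenPlace
  rw [pvA_norm, pvB_norm]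
  have hall := hpre
  unfold Pre_sumOfDoubleEvenPlace at hall
  rw [List.all_eq_true] at hall
  rw [pvFoldA _ hall 0]
  cases pvMapM (pvOddElems number.toList.reverse) with
  | none => rfl
  | some ds => simp
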